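-- pv_equiv track=rewrite | github.com/hyusterr/fin.rag | highlighter/base.py | generate_highlight_spans
-- ===== SOURCE A (Python) =====
-- from typing import List
--
-- def generate_highlight_spans(
--         words_tgt: List[str],
--         word_label_tgt: List[int],
--         smoothen=True,
--         max_gap=5,
--     ):
--     # ref: https://aclanthology.org/D19-5408.pdf
--     # we actually will not know how many token need to be highlighted if we don't peek the true label
--     # first version: use threshold labeling --> perform smoothing to generate spans
--     # connecting two selected words if there is a small gap (<5 words) between them.
--     # [0, 1, 1, 0, 0, 1, 0, 0, 0, 0, 0, 1] --> [0, 1, 1, 1, 1, 1, 0, 0, 0, 0, 0, 1]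
--     # span = ["token1 token2 token3 token4 token5", "token12"]
--     # TODO: need to check edge cases
--
--     smooth_tokenids = []
--     start = None
--     for i, label in enumerate(word_label_tgt):
--         if label:
--             smooth_tokenids.append(label)
--             if start is None:
--                 start = i
--             if start is not None and i - start < max_gap:
--                 smooth_tokenids[start:i+1] = [1] * (i - start + 1)
--             start = i
--
--         else:
--             smooth_tokenids.append(label)
--
--     i, spans = 0, []
--     tmp = []
--     for label in smooth_tokenids:
--         if label:
--             tmp.append(i)
--         else:
--             if tmp:
--                 spans.append(tmp)
--                 tmp = []
--         i += 1
--     highlight_spans_smooth = [' '.join(words_tgt[span[0]:span[-1]+1]) for span in spans]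
--
--     return smooth_tokenids, highlight_spans_smooth
-- ===== SOURCE B (Python) =====
-- from typing import List
--
-- def generate_highlight_spans(
--         words_tgt: List[str],
--         word_label_tgt: List[int],
--         smoothen=True,
--         max_gap=5,
--     ):
--     # Smoothing as an interval union: pair each highlighted index with the
--     # previous one (the first with itself, gap 0); every small-gap pair
--     # contributes its whole index range to a covered set, and the smoothed
--     # labels are rebuilt pointwise from that set.
--     truthy = [i for i, v in enumerate(word_label_tgt) if v]
--     covered = set()
--     for p, c in zip(truthy[:1] + truthy[:-1], truthy):
--         if c - p < max_gap:
--             covered.update(range(p, c + 1))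
--     smooth_tokenids = [1 if i in covered else v for i, v in enumerate(word_label_tgt)]
--     # Spans: collect the rising and falling edges of the highlight mask in one
--     # scan, then join the word slice of each completed (start, end) pair.
--     starts, ends = [], []
--     prev = False
--     for i, v in enumerate(smooth_tokenids):
--         f = bool(v)
--         if f and not prev:
--             starts.append(i)
--         if prev and not f:
--             ends.append(i)
--         prev = f
--     highlight_spans_smooth = [' '.join(words_tgt[s:e]) for s, e in zip(starts, ends)]
--     return smooth_tokenids, highlight_spans_smooth
-- ===== Notes on version B (the rewrite author's own statement) =====
-- stated objective: alternative
-- what changed: B replaces A's in-place slice-rewriting smoothing loop by an interval-union: it pairs each highlighted index with its predecessor, pours small-gap index ranges into a covered set and rebuilds the labels pointwise from that set; spans are then produced by collecting rising and falling edge index lists in one scan and zipping them into (start,end) slices, instead of A's grow-an-index-run-list-then-map-join pass.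
import Mathlib
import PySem

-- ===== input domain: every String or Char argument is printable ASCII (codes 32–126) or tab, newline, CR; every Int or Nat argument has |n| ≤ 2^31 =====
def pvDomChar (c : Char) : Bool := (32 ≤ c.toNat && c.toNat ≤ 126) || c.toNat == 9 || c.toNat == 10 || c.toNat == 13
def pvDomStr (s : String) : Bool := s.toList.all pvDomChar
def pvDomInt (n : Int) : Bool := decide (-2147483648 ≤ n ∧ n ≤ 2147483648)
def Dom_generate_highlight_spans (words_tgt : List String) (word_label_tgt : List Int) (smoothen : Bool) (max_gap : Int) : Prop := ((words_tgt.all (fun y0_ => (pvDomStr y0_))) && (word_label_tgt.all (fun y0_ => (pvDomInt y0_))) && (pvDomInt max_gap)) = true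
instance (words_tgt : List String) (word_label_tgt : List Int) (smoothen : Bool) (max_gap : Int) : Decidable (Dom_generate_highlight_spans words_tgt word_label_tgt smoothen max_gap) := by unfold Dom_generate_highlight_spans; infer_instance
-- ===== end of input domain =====

-- ===== PORT A =====
-- B smooths by an interval-union over predecessor pairs poured into a covered set and emits spans by
-- zipping rising/falling edge lists, instead of A's in-place slice rewriting and index-run collection
-- (objective: alternative).

-- A's first loop: for i, label in enumerate(word_label_tgt): append, track start, slice-assign [1]*(i-start+1).
-- The slice assignment smooth[start:i+1] = [1]*(i-start+1) hits the current tail (len smooth = i+1), i.e. take start ++ replicate.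
def ghsSmoothA (g : Int) : List Int → List Int → Nat → Option Nat → List Int
  | [], smooth, _, _ => smooth
  | label :: rest, smooth, i, start =>
    if label ≠ 0 then
      let s1 := smooth ++ [label]
      let start0 := start.getD i            -- "if start is None: start = i"
      let s2 := if (i : Int) - (start0 : Int) < g then s1.take start0 ++ List.replicate (i - start0 + 1) 1 else s1
      ghsSmoothA g rest s2 (i + 1) (some i)
    else
      ghsSmoothA g rest (smooth ++ [label]) (i + 1) start

-- A's second loop: collect maximal runs of truthy labels as index lists (a trailing run stays in tmp)
def ghsSpanA : List Int → Nat → List (List Nat) → List Nat → List (List Nat)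
  | [], _, spans, _ => spans
  | label :: rest, i, spans, tmp =>
    if label ≠ 0 then ghsSpanA rest (i + 1) spans (tmp ++ [i])
    else if tmp ≠ [] then ghsSpanA rest (i + 1) (spans ++ [tmp]) []
    else ghsSpanA rest (i + 1) spans tmp

-- ' '.join(words_tgt[span[0]:span[-1]+1]); spans produced by ghsSpanA are nonempty so the headD/getLastD defaults are unreachable
def ghsJoinA (words : List String) (span : List Nat) : String :=
  PySem.Str.join " " (PySem.List.slice words (some ((span.headD 0 : Nat) : Int)) (some (((span.getLastD 0 : Nat) : Int) + 1)))

def generate_highlight_spans (words_tgt : List String) (word_label_tgt : List Int) (smoothen : Bool) (max_gap : Int) : List Int × List String :=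
  let smooth := ghsSmoothA max_gap word_label_tgt [] 0 none
  let spans := ghsSpanA smooth 0 [] []
  (smooth, spans.map (ghsJoinA words_tgt))

-- ===== PORT B =====
-- truthy = [i for i, v in enumerate(word_label_tgt) if v]
def ghsTruthyB (labels : List Int) : List Int :=
  (PySem.List.enumerate labels 0).filterMap (fun iv => if iv.2 ≠ 0 then some iv.1 else none)

-- covered = set(); for p, c in zip(truthy[:1] + truthy[:-1], truthy): if c - p < max_gap: covered.update(range(p, c + 1))
def ghsCoveredB (g : Int) (truthy : List Int) : PySem.Set Int :=
  ((PySem.List.slice truthy none (some 1) ++ PySem.List.slice truthy none (some (-1))).zip truthy).foldl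
    (fun s pc => if pc.2 - pc.1 < g then PySem.Set.update s (PySem.List.pyRange pc.1 (pc.2 + 1) 1) else s)
    PySem.Set.empty

-- smooth_tokenids = [1 if i in covered else v for i, v in enumerate(word_label_tgt)]
def ghsSmoothB (covered : PySem.Set Int) (labels : List Int) : List Int :=
  (PySem.List.enumerate labels 0).map (fun iv => if PySem.Set.contains covered iv.1 then 1 else iv.2)

-- edge loop: one scan over the smoothed labels carrying (starts, ends) and prev
def ghsEdgesB : List Int → Int → Bool → List Int × List Int → List Int × List Int
  | [], _, _, acc => acc
  | v :: rest, i, prev, (ss, es) =>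
    let f : Bool := decide (v ≠ 0)
    ghsEdgesB rest (i + 1) f
      (ss ++ (if f && !prev then [i] else []), es ++ (if prev && !f then [i] else []))

def generate_highlight_spans_alt (words_tgt : List String) (word_label_tgt : List Int) (smoothen : Bool) (max_gap : Int) : List Int × List String :=
  let smooth := ghsSmoothB (ghsCoveredB max_gap (ghsTruthyB word_label_tgt)) word_label_tgt
  let edges := ghsEdgesB smooth 0 false ([], [])
  (smooth, (edges.1.zip edges.2).map
    (fun se => PySem.Str.join " " (PySem.List.slice words_tgt (some se.1) (some se.2))))

-- ===== PRECONDITION & SPEC =====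
def Spec_generate_highlight_spans (words_tgt : List String) (word_label_tgt : List Int) (smoothen : Bool) (max_gap : Int) (out : List Int × List String) : Prop := out = generate_highlight_spans_alt words_tgt word_label_tgt smoothen max_gap
instance (words_tgt : List String) (word_label_tgt : List Int) (smoothen : Bool) (max_gap : Int) (out : List Int × List String) : Decidable (Spec_generate_highlight_spans words_tgt word_label_tgt smoothen max_gap out) := by unfold Spec_generate_highlight_spans; infer_instance

-- ===== CLAIM (what is proved, stated in full; the proofs are below) =====
def Claim_equal_generate_highlight_spans : Prop := ∀ (words_tgt : List String) (word_label_tgt : List Int) (smoothen : Bool) (max_gap : Int), Dom_generate_highlight_spans words_tgt word_label_tgt smoothen max_gap → Spec_generate_highlight_spans words_tgt word_label_tgt smoothen max_gap (generate_highlight_spans words_tgt word_label_tgt smoothen max_gap)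

-- ===== LEMMAS AND PROOFS =====

-- ---- proof-side vocabulary ----

-- indices of truthy labels, accumulator-free form
def truthyIdx : Nat → List Int → List Nat
  | _, [] => []
  | i, v :: rest => if v ≠ 0 then i :: truthyIdx (i + 1) rest else truthyIdx (i + 1) rest

-- the (prev, cur) pairs A's smoothing effectively processes: first index with itself, then adjacent pairs
def pairsOfN : List Nat → Option Nat → List (Nat × Nat)
  | [], _ => []
  | c :: rest, st => (st.getD c, c) :: pairsOfN rest (some c)

-- "index j is covered by some small-gap pair"
def covB (g : Int) (prs : List (Nat × Nat)) (j : Nat) : Bool :=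
  prs.any (fun pc => decide ((pc.2 : Int) - (pc.1 : Int) < g) && decide (pc.1 ≤ j) && decide (j ≤ pc.2))

-- A's smoothing loop rephrased as one interval write per truthy index (A-side intermediate)
def ghsBridgeB (g : Int) : List Nat → List Int → Option Nat → List Int
  | [], cur, _ => cur
  | idx :: rest, cur, st =>
      ghsBridgeB g rest
        (if (idx : Int) - ((st.getD idx : Nat) : Int) < g then
          cur.take (st.getD idx) ++ List.replicate (idx - st.getD idx + 1) 1 ++ cur.drop (idx + 1)
        else cur)
        (some idx)

-- the joined words slice of one (start, end) pair
def joinSE (words : List String) (se : Int × Int) : String :=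
  PySem.Str.join " " (PySem.List.slice words (some se.1) (some se.2))

theorem smooth_eq (g : Int) : ∀ (rest smooth : List Int) (i : Nat) (start : Option Nat),
    smooth.length = i → (∀ p, start = some p → p < i) →
    ghsSmoothA g rest smooth i start = ghsBridgeB g (truthyIdx i rest) (smooth ++ rest) start := by
  intro rest
  induction rest with
  | nil => intro smooth i start hl _; simp [ghsSmoothA, truthyIdx, ghsBridgeB]
  | cons v rest ih =>
    intro smooth i start hl hp
    subst hl
    by_cases hv : v = 0
    · subst hv
      simp only [ghsSmoothA, truthyIdx, ne_eq, not_true_eq_false, if_false]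
      rw [ih _ (smooth.length + 1) start (by simp) (fun p h => Nat.lt_succ_of_lt (hp p h))]
      simp
    · match start with
      | none =>
        simp only [ghsSmoothA, truthyIdx, hv, ne_eq, not_false_eq_true, if_true, Option.getD_none,
          ghsBridgeB]
        by_cases hA : (smooth.length : Int) - (smooth.length : Int) < g
        · simp only [if_pos hA]
          have h1 : (smooth ++ [v]).take smooth.length
              ++ List.replicate (smooth.length - smooth.length + 1) 1 = smooth ++ [1] := by
            simp
          have h2 : (smooth ++ v :: rest).take smooth.length
                ++ List.replicate (smooth.length - smooth.length + 1) 1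
                ++ (smooth ++ v :: rest).drop (smooth.length + 1)
              = (smooth ++ [1]) ++ rest := by
            rw [List.take_append_of_le_length (le_refl _), List.take_length]
            simp
          rw [h1, h2, ih _ (smooth.length + 1) (some smooth.length) (by simp)
            (by rintro p ⟨rfl⟩; omega)]
        · simp only [if_neg hA]
          rw [ih (smooth ++ [v]) (smooth.length + 1) (some smooth.length) (by simp)
            (by rintro p ⟨rfl⟩; omega)]
          simp
      | some p =>
        have hpi : p < smooth.length := hp p rfl
        simp only [ghsSmoothA, truthyIdx, hv, ne_eq, not_false_eq_true, if_true, Option.getD_some,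
          ghsBridgeB]
        by_cases hc : (smooth.length : Int) - (p : Int) < g
        · simp only [if_pos hc]
          have h1 : (smooth ++ [v]).take p ++ List.replicate (smooth.length - p + 1) 1
              = smooth.take p ++ List.replicate (smooth.length - p + 1) 1 := by
            rw [List.take_append_of_le_length (by omega)]
          have hdrop : (smooth ++ v :: rest).drop (smooth.length + 1) = rest := by simp
          have h2 : (smooth ++ v :: rest).take p ++ List.replicate (smooth.length - p + 1) 1
                ++ (smooth ++ v :: rest).drop (smooth.length + 1)
              = (smooth.take p ++ List.replicate (smooth.length - p + 1) 1) ++ rest := by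
            rw [List.take_append_of_le_length (by omega), hdrop, List.append_assoc]
          rw [h1, h2, ih _ (smooth.length + 1) (some smooth.length)
            (by simp; omega) (by rintro q ⟨rfl⟩; omega)]
        · simp only [if_neg hc]
          rw [ih (smooth ++ [v]) (smooth.length + 1) (some smooth.length) (by simp)
            (by rintro q ⟨rfl⟩; omega)]
          simp

theorem mem_truthyIdx : ∀ (l : List Int) (i x : Nat), x ∈ truthyIdx i l → i ≤ x ∧ x < i + l.length := by
  intro l
  induction l with
  | nil => intro i x h; simp [truthyIdx] at h
  | cons v rest ih =>
    intro i x h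
    by_cases hv : v = 0
    · simp only [truthyIdx, hv, ne_eq, not_true_eq_false, if_false] at h
      have := ih (i + 1) x h
      simp only [List.length_cons]
      omega
    · simp only [truthyIdx, hv, ne_eq, not_false_eq_true, if_true, List.mem_cons] at h
      rcases h with rfl | h
      · simp only [List.length_cons]; omega
      · have := ih (i + 1) x h
        simp only [List.length_cons]
        omega

theorem truthyIdx_pairwise : ∀ (l : List Int) (i : Nat), (truthyIdx i l).Pairwise (· < ·) := by
  intro l
  induction l with
  | nil => intro i; simp [truthyIdx]
  | cons v rest ih =>
    intro i
    by_cases hv : v = 0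
    · simpa [truthyIdx, hv] using ih (i + 1)
    · simp only [truthyIdx, hv, ne_eq, not_false_eq_true, if_true]
      exact List.pairwise_cons.mpr ⟨fun x hx => by have := mem_truthyIdx rest (i + 1) x hx; omega, ih (i + 1)⟩

theorem mem_pairsOfN_snd : ∀ (t : List Nat) (st : Option Nat) (pc : Nat × Nat),
    pc ∈ pairsOfN t st → pc.2 ∈ t := by
  intro t
  induction t with
  | nil => intro st pc h; simp [pairsOfN] at h
  | cons c rest ih =>
    intro st pc h
    simp only [pairsOfN, List.mem_cons] at h
    rcases h with rfl | h
    · simp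
    · exact List.mem_cons_of_mem _ (ih (some c) pc h)

theorem pairs_some : ∀ (t : List Nat) (p : Nat), pairsOfN t (some p) = (p :: t.dropLast).zip t := by
  intro t
  induction t with
  | nil => intro p; rfl
  | cons c r ih =>
    intro p
    cases r with
    | nil => rfl
    | cons c2 r2 =>
      show (p, c) :: pairsOfN (c2 :: r2) (some c) = _
      rw [ih c]
      rfl

theorem pairs_none : ∀ (t : List Nat), pairsOfN t none = (t.take 1 ++ t.dropLast).zip t := by
  intro t
  cases t with
  | nil => rfl
  | cons c r =>
    show (c, c) :: pairsOfN r (some c) = _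
    rw [pairs_some r c]
    cases r with
    | nil => rfl
    | cons c2 r2 => rfl

-- one interval write, read back pointwise
theorem write_getElem? (cur : List Int) (p c : Nat) (hpc : p ≤ c) (hc : c < cur.length) (j : Nat) :
    (cur.take p ++ (List.replicate (c - p + 1) (1 : Int) ++ cur.drop (c + 1)))[j]?
      = if p ≤ j ∧ j ≤ c then some 1 else cur[j]? := by
  have htp : (cur.take p).length = p := by simp; omega
  by_cases h1 : j < p
  · rw [List.getElem?_append_left (by omega), List.getElem?_take, if_pos h1, if_neg (by omega)]
  · rw [List.getElem?_append_right (by omega)]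
    by_cases h2 : j ≤ c
    · rw [List.getElem?_append_left (by simp; omega), List.getElem?_replicate_of_lt (by omega),
        if_pos ⟨by omega, h2⟩]
    · rw [List.getElem?_append_right (by simp; omega), List.getElem?_drop, if_neg (by omega)]
      congr 1
      simp only [htp, List.length_replicate]
      omega

theorem write_length (cur : List Int) (p c : Nat) (hpc : p ≤ c) (hc : c < cur.length) :
    (cur.take p ++ (List.replicate (c - p + 1) (1 : Int) ++ cur.drop (c + 1))).length = cur.length := by
  simp
  omega

theorem bridge_step (g : Int) (rest : List Nat) (cur : List Int) (idx p j : Nat)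
    (hp : p ≤ idx) (hidx : idx < cur.length)
    (hlen : ∀ x ∈ rest, x < cur.length) (hpw : rest.Pairwise (· < ·))
    (hrest : ∀ x ∈ rest, idx < x)
    (ih : ∀ (cur : List Int) (st : Option Nat), (∀ x ∈ rest, x < cur.length) →
      rest.Pairwise (· < ·) → (∀ q, st = some q → ∀ x ∈ rest, q < x) →
      ∀ j : Nat, (ghsBridgeB g rest cur st)[j]? = if covB g (pairsOfN rest st) j then some 1 else cur[j]?) :
    (ghsBridgeB g rest
        (if (idx : Int) - (p : Int) < g then
          cur.take p ++ List.replicate (idx - p + 1) 1 ++ cur.drop (idx + 1)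
        else cur) (some idx))[j]?
      = if covB g ((p, idx) :: pairsOfN rest (some idx)) j then some 1 else cur[j]? := by
  have hcons : covB g ((p, idx) :: pairsOfN rest (some idx)) j
      = ((decide ((idx : Int) - (p : Int) < g) && decide (p ≤ j) && decide (j ≤ idx))
          || covB g (pairsOfN rest (some idx)) j) := by
    simp only [covB, List.any_cons]
  by_cases hgap : (idx : Int) - (p : Int) < g
  · rw [if_pos hgap, List.append_assoc]
    have hWlen := write_length cur p idx hp hidx
    rw [ih _ (some idx) (fun x hx => by rw [hWlen]; exact hlen x hx) hpw
      (fun q hq x hx => by cases hq; exact hrest x hx) j]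
    by_cases hcov : covB g (pairsOfN rest (some idx)) j = true
    · rw [if_pos hcov, hcons, hcov, Bool.or_true, if_pos rfl]
    · have hcovf : covB g (pairsOfN rest (some idx)) j = false := by
        revert hcov; cases covB g (pairsOfN rest (some idx)) j <;> simp
      rw [if_neg hcov, hcons, hcovf, Bool.or_false, write_getElem? cur p idx hp hidx j,
        decide_eq_true hgap, Bool.true_and]
      by_cases hj : p ≤ j ∧ j ≤ idx
      · rw [if_pos hj, if_pos (by simp [hj.1, hj.2])]
      · rw [if_neg hj, if_neg (by simp; omega)]
  · rw [if_neg hgap]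
    rw [ih cur (some idx) hlen hpw (fun q hq x hx => by cases hq; exact hrest x hx) j]
    rw [hcons, decide_eq_false hgap, Bool.false_and, Bool.false_and, Bool.false_or]

theorem bridge_getElem? (g : Int) : ∀ (t : List Nat) (cur : List Int) (st : Option Nat),
    (∀ x ∈ t, x < cur.length) → t.Pairwise (· < ·) →
    (∀ q, st = some q → ∀ x ∈ t, q < x) →
    ∀ j : Nat, (ghsBridgeB g t cur st)[j]? = if covB g (pairsOfN t st) j then some 1 else cur[j]? := by
  intro t
  induction t with
  | nil =>
    intro cur st _ _ _ j
    simp [ghsBridgeB, pairsOfN, covB]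
  | cons idx rest ih =>
    intro cur st hlen hpw hst j
    have hidx : idx < cur.length := hlen idx (by simp)
    have hrestlt : ∀ x ∈ rest, idx < x := (List.pairwise_cons.mp hpw).1
    have hpw' := (List.pairwise_cons.mp hpw).2
    have hlen' : ∀ x ∈ rest, x < cur.length := fun x hx => hlen x (List.mem_cons_of_mem _ hx)
    have hp : st.getD idx ≤ idx := by
      cases st with
      | none => simp
      | some p => simpa using Nat.le_of_lt (hst p rfl idx (by simp))
    show (ghsBridgeB g rest
        (if (idx : Int) - ((st.getD idx : Nat) : Int) < g then
          cur.take (st.getD idx) ++ List.replicate (idx - st.getD idx + 1) 1 ++ cur.drop (idx + 1)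
        else cur) (some idx))[j]? = _
    rw [bridge_step g rest cur idx (st.getD idx) j hp hidx hlen' hpw' hrestlt ih]
    rfl

theorem truthy_cast : ∀ (l : List Int) (n : Nat),
    (PySem.List.enumerate l (n : Int)).filterMap (fun iv => if iv.2 ≠ 0 then some iv.1 else none)
      = (truthyIdx n l).map (fun x : Nat => (x : Int)) := by
  intro l
  induction l with
  | nil => intro n; simp [PySem.List.enumerate_nil, truthyIdx]
  | cons v rest ih =>
    intro n
    rw [PySem.List.enumerate_cons]
    have hcast : (n : Int) + 1 = ((n + 1 : Nat) : Int) := by push_cast; ring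
    by_cases hv : v = 0
    · simp only [truthyIdx, hv, ne_eq, not_true_eq_false, if_false, List.filterMap_cons]
      rw [hcast, ih (n + 1)]
    · simp only [truthyIdx, hv, ne_eq, not_false_eq_true, if_true, List.filterMap_cons]
      rw [hcast, ih (n + 1)]
      simp

theorem mem_coveredFold (g : Int) : ∀ (prs : List (Int × Int)) (s : List Int) (x : Int),
    x ∈ prs.foldl
        (fun s pc => if pc.2 - pc.1 < g then PySem.Set.update s (PySem.List.pyRange pc.1 (pc.2 + 1) 1) else s) s
      ↔ x ∈ s ∨ ∃ pc ∈ prs, pc.2 - pc.1 < g ∧ pc.1 ≤ x ∧ x ≤ pc.2 := by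
  intro prs
  induction prs with
  | nil => intro s x; simp
  | cons pc rest ih =>
    intro s x
    simp only [List.foldl_cons]
    rw [ih]
    by_cases hgap : pc.2 - pc.1 < g
    · rw [if_pos hgap]
      rw [PySem.Set.mem_update]
      constructor
      · rintro ((hx | hx) | ⟨q, hq, hs⟩)
        · exact Or.inl hx
        · rw [PySem.List.mem_pyRange_one] at hx
          exact Or.inr ⟨pc, List.mem_cons_self .., hgap, hx.1, by omega⟩
        · exact Or.inr ⟨q, List.mem_cons_of_mem _ hq, hs⟩
      · rintro (hx | ⟨q, hq, hs⟩)
        · exact Or.inl (Or.inl hx)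
        · rcases List.mem_cons.mp hq with rfl | hq
          · exact Or.inl (Or.inr (PySem.List.mem_pyRange_one.mpr ⟨hs.2.1, by omega⟩))
          · exact Or.inr ⟨q, hq, hs⟩
    · rw [if_neg hgap]
      constructor
      · rintro (hx | ⟨q, hq, hs⟩)
        · exact Or.inl hx
        · exact Or.inr ⟨q, List.mem_cons_of_mem _ hq, hs⟩
      · rintro (hx | ⟨q, hq, hs⟩)
        · exact Or.inl hx
        · rcases List.mem_cons.mp hq with rfl | hq
          · exact absurd hs.1 hgap
          · exact Or.inr ⟨q, hq, hs⟩

theorem pairsInt_eq (labels : List Int) :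
    (PySem.List.slice (ghsTruthyB labels) none (some 1)
        ++ PySem.List.slice (ghsTruthyB labels) none (some (-1))).zip (ghsTruthyB labels)
      = (pairsOfN (truthyIdx 0 labels) none).map (fun pc => ((pc.1 : Int), (pc.2 : Int))) := by
  have ht : ghsTruthyB labels = (truthyIdx 0 labels).map (fun x : Nat => (x : Int)) :=
    truthy_cast labels 0
  rw [ht, PySem.List.slice_to_neg_one]
  rw [show PySem.List.slice ((truthyIdx 0 labels).map (fun x : Nat => (x : Int))) none (some 1)
      = ((truthyIdx 0 labels).map (fun x : Nat => (x : Int))).take 1 from by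
    rw [PySem.List.slice_to] <;> norm_num]
  rw [← List.map_take, ← List.map_dropLast, ← List.map_append, List.zip_map, pairs_none]
  rfl

theorem enum_getElem? : ∀ (l : List Int) (s : Int) (j : Nat),
    (PySem.List.enumerate l s)[j]? = l[j]?.map (fun v => (s + (j : Int), v)) := by
  intro l
  induction l with
  | nil => intro s j; simp [PySem.List.enumerate_nil]
  | cons x xs ih =>
    intro s j
    rw [PySem.List.enumerate_cons]
    cases j with
    | zero => simp
    | succ j' =>
      simp only [List.getElem?_cons_succ]
      rw [ih (s + 1) j']
      cases xs[j']? <;> simp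
      ring

theorem contains_covered (g : Int) (labels : List Int) (j : Nat) :
    PySem.Set.contains (ghsCoveredB g (ghsTruthyB labels)) (j : Int)
      = covB g (pairsOfN (truthyIdx 0 labels) none) j := by
  rw [Bool.eq_iff_iff, PySem.Set.contains_iff]
  rw [ghsCoveredB, pairsInt_eq, mem_coveredFold]
  rw [covB, List.any_eq_true]
  simp only [PySem.Set.empty, List.not_mem_nil, false_or, List.mem_map, Bool.and_eq_true,
    decide_eq_true_eq]
  constructor
  · rintro ⟨pcI, ⟨⟨a, b⟩, hmem, rfl⟩, hgap, hl, hr⟩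
    exact ⟨(a, b), hmem, ⟨by simpa using hgap, by simpa using hl⟩, by simpa using hr⟩
  · rintro ⟨⟨a, b⟩, hmem, ⟨hgap, hl⟩, hr⟩
    exact ⟨((a : Int), (b : Int)), ⟨(a, b), hmem, rfl⟩, by simpa using hgap, by simpa using hl,
      by simpa using hr⟩

theorem smoothB_eq (g : Int) (labels : List Int) :
    ghsSmoothB (ghsCoveredB g (ghsTruthyB labels)) labels
      = ghsBridgeB g (truthyIdx 0 labels) labels none := by
  apply List.ext_getElem?
  intro j
  have hb := bridge_getElem? g (truthyIdx 0 labels) labels none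
    (fun x hx => by have := mem_truthyIdx labels 0 x hx; omega)
    (truthyIdx_pairwise labels 0) (fun q hq => by cases hq) j
  rw [hb, ghsSmoothB, List.getElem?_map, enum_getElem?]
  simp only [zero_add]
  by_cases hcov : covB g (pairsOfN (truthyIdx 0 labels) none) j = true
  · rw [if_pos hcov]
    obtain ⟨pc, hpc, hcs⟩ := List.any_eq_true.mp hcov
    have hc2 : pc.2 ∈ truthyIdx 0 labels := mem_pairsOfN_snd _ _ _ hpc
    have hj2 : j ≤ pc.2 := by
      simp only [Bool.and_eq_true, decide_eq_true_eq] at hcs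
      exact hcs.2
    have hjlen : j < labels.length := by
      have := mem_truthyIdx labels 0 pc.2 hc2
      omega
    rw [List.getElem?_eq_getElem hjlen]
    simp only [Option.map_some]
    rw [contains_covered g labels j, hcov]
    simp
  · rw [if_neg hcov]
    have hcovf : covB g (pairsOfN (truthyIdx 0 labels) none) j = false := by
      revert hcov; cases covB g (pairsOfN (truthyIdx 0 labels) none) j <;> simp
    cases h : labels[j]? with
    | none => simp
    | some v =>
      simp only [Option.map_some]
      rw [contains_covered g labels j, hcovf]
      simp

-- the span pass: A's run collection matches the zipped rising/falling edge lists
theorem span_eq (words : List String) : ∀ (l : List Int) (i : Nat) (spans : List (List Nat))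
    (tmp : List Nat) (ss es : List Int) (prev : Bool),
    ((prev = false ∧ tmp = [] ∧ ss.length = es.length ∧
        (ss.zip es).map (joinSE words) = spans.map (ghsJoinA words)) ∨
     (∃ s ss0, prev = true ∧ s < i ∧ tmp = List.range' s (i - s) ∧ ss = ss0 ++ [((s : Nat) : Int)] ∧
        ss0.length = es.length ∧ (ss0.zip es).map (joinSE words) = spans.map (ghsJoinA words))) →
    (ghsSpanA l i spans tmp).map (ghsJoinA words)
      = ((ghsEdgesB l (i : Int) prev (ss, es)).1.zip (ghsEdgesB l (i : Int) prev (ss, es)).2).map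
          (joinSE words) := by
  intro l
  induction l with
  | nil =>
    intro i spans tmp ss es prev hinv
    rcases hinv with ⟨hprev, htmp, hlen, hmap⟩ | ⟨s, ss0, hprev, hsi, htmp, hss, hlen, hmap⟩
    · simp only [ghsSpanA, ghsEdgesB]
      exact hmap.symm
    · subst hss
      simp only [ghsSpanA, ghsEdgesB]
      have hz : (ss0 ++ [((s : Nat) : Int)]).zip es = ss0.zip es := by
        conv_lhs => rw [show es = es ++ ([] : List Int) by simp]
        rw [List.zip_append hlen]
        simp
      rw [hz]
      exact hmap.symm
  | cons v rest ih =>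
    intro i spans tmp ss es prev hinv
    have hcast : (i : Int) + 1 = ((i + 1 : Nat) : Int) := by push_cast; ring
    have hstep : ∀ (iI : Int) (prev : Bool) (ss es : List Int),
        ghsEdgesB (v :: rest) iI prev (ss, es)
          = ghsEdgesB rest (iI + 1) (decide (v ≠ 0))
              (ss ++ (if decide (v ≠ 0) && !prev then [iI] else []),
               es ++ (if prev && !decide (v ≠ 0) then [iI] else [])) :=
      fun _ _ _ _ => rfl
    by_cases hv : v = 0
    · subst hv
      have hf : decide ((0 : Int) ≠ 0) = false := by decide
      rcases hinv with ⟨hprev, htmp, hlen, hmap⟩ | ⟨s, ss0, hprev, hsi, htmp, hss, hlen, hmap⟩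
      · subst hprev htmp
        rw [hstep, hf]
        simp only [Bool.false_and, Bool.not_false, Bool.false_eq_true, if_false,
          List.append_nil, hcast]
        rw [show ghsSpanA (0 :: rest) i spans [] = ghsSpanA rest (i + 1) spans [] from by
          simp [ghsSpanA]]
        exact ih (i + 1) spans [] ss es false (Or.inl ⟨rfl, rfl, hlen, hmap⟩)
      · subst hprev htmp hss
        have hne : List.range' s (i - s) ≠ [] := by
          simp [List.range'_eq_nil_iff]
          omega
        rw [hstep, hf]
        simp only [Bool.false_and, Bool.not_false, Bool.true_and, Bool.false_eq_true, if_false,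
          if_true, List.append_nil, hcast]
        rw [show ghsSpanA (0 :: rest) i spans (List.range' s (i - s))
            = ghsSpanA rest (i + 1) (spans ++ [List.range' s (i - s)]) [] from by
          simp [ghsSpanA, hne]]
        refine ih (i + 1) (spans ++ [List.range' s (i - s)]) [] (ss0 ++ [((s : Nat) : Int)])
          (es ++ [(i : Int)]) false (Or.inl ⟨rfl, rfl, by simp [hlen], ?_⟩)
        rw [List.zip_append hlen]
        simp only [List.map_append, hmap, List.map_cons, List.map_nil]
        congr 2
        -- joinSE words (s, i) = ghsJoinA words (range' s (i - s))
        unfold ghsJoinA joinSE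
        obtain ⟨m, hm⟩ : ∃ m, i - s = m + 1 := ⟨i - s - 1, by omega⟩
        rw [hm]
        have hhead : (List.range' s (m + 1)).headD 0 = s := by simp [List.range'_succ]
        have hlast : (List.range' s (m + 1)).getLastD 0 = s + m := by
          rw [List.range'_concat]
          simp
        rw [hhead, hlast]
        have heq : ((s + m : Nat) : Int) + 1 = (i : Int) := by push_cast; omega
        rw [heq]
        simp
    · have hf : decide (v ≠ 0) = true := by simp [hv]
      rcases hinv with ⟨hprev, htmp, hlen, hmap⟩ | ⟨s, ss0, hprev, hsi, htmp, hss, hlen, hmap⟩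
      · subst hprev htmp
        rw [hstep, hf]
        simp only [Bool.true_and, Bool.not_false, Bool.false_and, if_true,
          Bool.false_eq_true, if_false, List.append_nil, hcast]
        rw [show ghsSpanA (v :: rest) i spans [] = ghsSpanA rest (i + 1) spans ([] ++ [i]) from by
          simp [ghsSpanA, hv]]
        exact ih (i + 1) spans ([] ++ [i]) (ss ++ [(i : Int)]) es true
          (Or.inr ⟨i, ss, rfl, by omega, by simp, rfl, hlen, hmap⟩)
      · subst hprev htmp hss
        rw [hstep, hf]
        simp only [Bool.true_and, Bool.not_true, Bool.and_false, Bool.false_eq_true, if_false,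
          List.append_nil, hcast]
        rw [show ghsSpanA (v :: rest) i spans (List.range' s (i - s))
            = ghsSpanA rest (i + 1) spans (List.range' s (i - s) ++ [i]) from by
          simp [ghsSpanA, hv]]
        have hext : List.range' s (i - s) ++ [i] = List.range' s (i + 1 - s) := by
          have h' : i + 1 - s = (i - s) + 1 := by omega
          rw [h', List.range'_concat]
          congr 2
          omega
        rw [hext]
        exact ih (i + 1) spans (List.range' s (i + 1 - s)) (ss0 ++ [((s : Nat) : Int)]) es true
          (Or.inr ⟨s, ss0, rfl, by omega, rfl, rfl, hlen, hmap⟩)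

-- ===== VERDICT (by name: the statement is the Claim_ definition above) =====
theorem generate_highlight_spans_spec : Claim_equal_generate_highlight_spans := by
  intro words labels smoothen g _
  unfold Spec_generate_highlight_spans generate_highlight_spans generate_highlight_spans_alt
  have hsm : ghsSmoothA g labels [] 0 none = ghsSmoothB (ghsCoveredB g (ghsTruthyB labels)) labels := by
    rw [smooth_eq g labels [] 0 none rfl (by simp), smoothB_eq]
    simp
  simp only [hsm]
  refine congrArg (Prod.mk _) ?_
  have h := span_eq words (ghsSmoothB (ghsCoveredB g (ghsTruthyB labels)) labels) 0 [] [] [] [] false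
    (Or.inl ⟨rfl, rfl, rfl, by simp⟩)
  simp only [Nat.cast_zero] at h
  exact h
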